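-- pv_equiv track=rewrite | github.com/Kibana21/craft | backend/app/schemas/gamification.py | get_milestone
-- ===== SOURCE A (Python) =====
-- MILESTONES = [
--     (0, "Bronze Creator"),
--     (500, "Silver Creator"),
--     (2000, "Gold Creator"),
--     (5000, "Platinum Creator"),
--     (10000, "Diamond Creator"),
-- ]
--
-- def get_milestone(points: int) -> tuple[str, int, int]:
--     """Return (current_level, current_threshold, next_threshold)."""
--     current = MILESTONES[0]
--     for threshold, name in MILESTONES:
--         if points >= threshold:
--             current = (threshold, name)
--     idx = next((i for i, (t, _) in enumerate(MILESTONES) if t == current[0]), 0)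
--     if idx + 1 < len(MILESTONES):
--         next_threshold = MILESTONES[idx + 1][0]
--     else:
--         next_threshold = current[0]
--     return current[1], current[0], next_threshold
-- ===== SOURCE B (Python) =====
-- MILESTONES = [
--     (0, "Bronze Creator"),
--     (500, "Silver Creator"),
--     (2000, "Gold Creator"),
--     (5000, "Platinum Creator"),
--     (10000, "Diamond Creator"),
-- ]
--
-- def get_milestone(points: int) -> tuple[str, int, int]:
--     """Return (current_level, current_threshold, next_threshold)."""
--     # binary search: lo ends at bisect_right(thresholds, points)
--     lo, hi = 0, len(MILESTONES)
--     while lo < hi: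
--         mid = (lo + hi) // 2
--         if MILESTONES[mid][0] <= points:
--             lo = mid + 1
--         else:
--             hi = mid
--     idx = max(lo - 1, 0)
--     threshold, name = MILESTONES[idx]
--     if idx + 1 < len(MILESTONES):
--         next_threshold = MILESTONES[idx + 1][0]
--     else:
--         next_threshold = threshold
--     return name, threshold, next_threshold
-- ===== Notes on version B (the rewrite author's own statement) =====
-- stated objective: alternative
-- what changed: Replaces A's full forward scan plus a separate linear index re-search with a single hand-written binary search (bisect_right) over the thresholds, clamped at the bottom, reading the result row directly.
import Mathlib
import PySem

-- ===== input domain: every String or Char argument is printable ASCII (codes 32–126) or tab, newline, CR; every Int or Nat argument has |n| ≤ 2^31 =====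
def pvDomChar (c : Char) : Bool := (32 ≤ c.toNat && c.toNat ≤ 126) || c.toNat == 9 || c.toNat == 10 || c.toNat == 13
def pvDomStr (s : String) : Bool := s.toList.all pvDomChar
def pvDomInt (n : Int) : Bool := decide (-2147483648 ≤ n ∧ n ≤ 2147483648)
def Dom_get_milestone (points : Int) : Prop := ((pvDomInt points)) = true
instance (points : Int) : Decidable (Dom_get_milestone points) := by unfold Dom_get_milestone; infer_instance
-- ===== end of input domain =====

-- B: replaces A's forward scan + linear index re-search with one clamped binary search; same return value.
-- ===== PORT A =====
def MILESTONES : List (Int × String) :=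
  [(0, "Bronze Creator"), (500, "Silver Creator"), (2000, "Gold Creator"),
   (5000, "Platinum Creator"), (10000, "Diamond Creator")]

def get_milestone (points : Int) : String × Int × Int :=
  let current := MILESTONES.getD 0 (0, "")
  let current := MILESTONES.foldl
    (fun current tn => if points ≥ tn.1 then tn else current) current
  let idx : Int := (((PySem.List.enumerate MILESTONES).find?
      (fun p => p.2.1 == current.1)).map (·.1)).getD 0
  let next_threshold :=
    if idx + 1 < (MILESTONES.length : Int) then (PySem.List.pyGetD MILESTONES (idx + 1) (0, "")).1
    else current.1
  (current.2, current.1, next_threshold)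

-- ===== PORT B =====
-- the while-loop of Source B, recursion on hi - lo
def bsLoop (points : Int) (lo hi : Nat) : Nat :=
  if lo < hi then
    let mid := (lo + hi) / 2
    if (MILESTONES.getD mid (0, "")).1 ≤ points then bsLoop points (mid + 1) hi
    else bsLoop points lo mid
  else lo
termination_by hi - lo
decreasing_by all_goals omega

def get_milestone_alt (points : Int) : String × Int × Int :=
  let lo := bsLoop points 0 MILESTONES.length
  let idx := max (lo - 1) 0
  let tn := MILESTONES.getD idx (0, "")
  let next_threshold :=
    if idx + 1 < MILESTONES.length then (MILESTONES.getD (idx + 1) (0, "")).1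
    else tn.1
  (tn.2, tn.1, next_threshold)

-- ===== PRECONDITION & SPEC =====
def Spec_get_milestone (points : Int) (out : String × Int × Int) : Prop := out = get_milestone_alt points
instance (points : Int) (out : String × Int × Int) : Decidable (Spec_get_milestone points out) := by unfold Spec_get_milestone; infer_instance

-- ===== CLAIM (what is proved, stated in full; the proofs are below) =====
def Claim_equal_get_milestone : Prop := ∀ (points : Int), Dom_get_milestone points → Spec_get_milestone points (get_milestone points)

-- ===== LEMMAS AND PROOFS =====

-- ===== VERDICT (by name: the statement is the Claim_ definition above) =====
theorem get_milestone_spec : Claim_equal_get_milestone := by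
  intro points _
  unfold Spec_get_milestone
  rcases lt_or_ge points 0 with h|h
  · have h0 : ¬ ((0:Int) ≤ points) := by omega
    have h1 : ¬ ((500:Int) ≤ points) := by omega
    have h2 : ¬ ((2000:Int) ≤ points) := by omega
    have h3 : ¬ ((5000:Int) ≤ points) := by omega
    have h4 : ¬ ((10000:Int) ≤ points) := by omega
    simp [get_milestone, get_milestone_alt, bsLoop, MILESTONES, PySem.List.pyGetD, PySem.List.pyGet?, PySem.List.pyIdx?, h0, h1, h2, h3, h4, ge_iff_le]
  · rcases lt_or_ge points 500 with h'|h'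
    · have h1 : ¬ ((500:Int) ≤ points) := by omega
      have h2 : ¬ ((2000:Int) ≤ points) := by omega
      have h3 : ¬ ((5000:Int) ≤ points) := by omega
      have h4 : ¬ ((10000:Int) ≤ points) := by omega
      simp [get_milestone, get_milestone_alt, bsLoop, MILESTONES, PySem.List.pyGetD, PySem.List.pyGet?, PySem.List.pyIdx?, h, h1, h2, h3, h4, ge_iff_le]
    · rcases lt_or_ge points 2000 with h2|h2
      · have h3 : ¬ ((2000:Int) ≤ points) := by omega
        have h4 : ¬ ((5000:Int) ≤ points) := by omega
        have h5 : ¬ ((10000:Int) ≤ points) := by omega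
        simp [get_milestone, get_milestone_alt, bsLoop, MILESTONES, PySem.List.pyGetD, PySem.List.pyGet?, PySem.List.pyIdx?, h, h', h3, h4, h5, ge_iff_le]
      · rcases lt_or_ge points 5000 with h3|h3
        · have h4 : ¬ ((5000:Int) ≤ points) := by omega
          have h5 : ¬ ((10000:Int) ≤ points) := by omega
          simp [get_milestone, get_milestone_alt, bsLoop, MILESTONES, PySem.List.pyGetD, PySem.List.pyGet?, PySem.List.pyIdx?, h, h2, h4, h5, ge_iff_le]
        · rcases lt_or_ge points 10000 with h4|h4
          · have h5 : ¬ ((10000:Int) ≤ points) := by omega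
            simp [get_milestone, get_milestone_alt, bsLoop, MILESTONES, PySem.List.pyGetD, PySem.List.pyGet?, PySem.List.pyIdx?, h, h2, h3, h5, ge_iff_le]
          · simp [get_milestone, get_milestone_alt, bsLoop, MILESTONES, PySem.List.pyGetD, PySem.List.pyGet?, PySem.List.pyIdx?, h, h2, h3, h4, ge_iff_le]
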